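-- pv_equiv track=rewrite | github.com/kynax/AdventOfCode | 2018/day08/part2.py | process
-- ===== SOURCE A (Python) =====
-- def process(d, t):
-- 	nb_child = d.pop(0)
-- 	nb_meta = d.pop(0)
--
-- 	# if no child, score is total of metadata
-- 	if nb_child == 0:
-- 		for i in range(nb_meta):
-- 			t += d.pop(0)
-- 		return d,t
--
-- 	# if child, sum child nodes
-- 	child = []
-- 	for i in range(nb_child):
-- 		d,t = process(d,t)
-- 		child.append(t)
--
-- 	for i in range(nb_meta):
-- 		idx = d.pop(0)
-- 		if idx >= 0 and idx < len(child):
-- 			t += child[idx]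
--
-- 	return d,t
-- ===== SOURCE B (Python) =====
-- # B: two-pass re-implementation — first parse the flat list into an explicit
-- # tree (mutating d with pop(0) exactly like A), then evaluate the tree with a
-- # pure recursive evaluator.  Same return value and same in-place mutation of d.
-- def process(d, t):
--     node = _parse(d)
--     return d, _eval(node, t)
--
-- def _parse(d):
--     nc = d.pop(0)
--     nm = d.pop(0)
--     children = [_parse(d) for _ in range(nc)]
--     metas = [d.pop(0) for _ in range(nm)]
--     return (nc, children, metas)
--
-- def _eval(node, t):
--     nc, children, metas = node
--     if nc == 0:
--         for m in metas:
--             t += m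
--         return t
--     snaps = []
--     for c in children:
--         t = _eval(c, t)
--         snaps.append(t)
--     for idx in metas:
--         if 0 <= idx < len(snaps):
--             t += snaps[idx]
--     return t
-- ===== Notes on version B (the rewrite author's own statement) =====
-- stated objective: alternative
-- what changed: B replaces A's single-pass mutating recursion (interleaving parsing and scoring) with two passes: a parser that builds an explicit tree structure, then a pure recursive evaluator that threads the accumulator over that tree.
import Mathlib
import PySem

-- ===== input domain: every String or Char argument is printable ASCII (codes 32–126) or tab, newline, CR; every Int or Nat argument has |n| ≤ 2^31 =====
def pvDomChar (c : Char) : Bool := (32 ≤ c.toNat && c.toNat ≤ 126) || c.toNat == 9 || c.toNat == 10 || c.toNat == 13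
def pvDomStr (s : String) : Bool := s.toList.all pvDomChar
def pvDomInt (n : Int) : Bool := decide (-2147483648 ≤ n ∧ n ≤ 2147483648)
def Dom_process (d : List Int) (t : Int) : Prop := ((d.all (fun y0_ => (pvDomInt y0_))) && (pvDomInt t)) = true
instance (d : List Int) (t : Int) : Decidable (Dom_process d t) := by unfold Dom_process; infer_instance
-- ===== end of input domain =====

-- B re-implements A as parse-then-evaluate instead of A's fused single pass;
-- equivalence of the RETURN value is proved (both Pythons mutate d in place identically).

-- ===== PORT A =====
-- A raises IndexError on pop from an empty list; each such pop becomes `none`.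
-- `popLeaf n d t` = the leaf loop `for i in range(nb_meta): t += d.pop(0)`.
def popLeaf : Nat → List Int → Int → Option (List Int × Int)
  | 0, d, t => some (d, t)
  | _+1, [], _ => none
  | n+1, x :: d, t => popLeaf n d (t + x)

-- the second loop of A: pop an index, add child[idx] when 0 <= idx < len(child)
def metaLoop : Nat → List Int → Int → List Int → Option (List Int × Int)
  | 0, d, t, _ => some (d, t)
  | _+1, [], _, _ => none
  | n+1, idx :: d, t, ch =>
      metaLoop n d (if 0 ≤ idx ∧ idx < (ch.length : Int) then t + ch.getD idx.toNat 0 else t) ch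

mutual
-- fuel bounds the recursion depth only; `process` passes d.length + 1, which is
-- always sufficient because each level consumes two elements before recursing.
def processA : Nat → List Int → Int → Option (List Int × Int)
  | 0, _, _ => none
  | _+1, [], _ => none
  | _+1, [_], _ => none
  | fuel+1, nc :: nm :: rest, t =>
      if nc = 0 then popLeaf nm.toNat rest t
      else
        match childLoop fuel nc.toNat rest t [] with
        | none => none
        | some (d', t', ch) => metaLoop nm.toNat d' t' ch
  termination_by fuel _ _ => (fuel, 0)
-- the first loop of A: `for i in range(nb_child): d,t = process(d,t); child.append(t)`
def childLoop : Nat → Nat → List Int → Int → List Int → Option (List Int × Int × List Int)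
  | _, 0, d, t, ch => some (d, t, ch)
  | fuel, n+1, d, t, ch =>
      match processA fuel d t with
      | none => none
      | some (d', t') => childLoop fuel n d' t' (ch ++ [t'])
  termination_by fuel n _ _ _ => (fuel, n + 1)
end

def process (d : List Int) (t : Int) : List Int × Int :=
  (processA (d.length + 1) d t).getD (d, t)

-- ===== PORT B =====
mutual
inductive PTree : Type where
  | mk : Int → PForest → List Int → PTree
inductive PForest : Type where
  | nil : PForest
  | cons : PTree → PForest → PForest
end

-- `metas = [d.pop(0) for _ in range(nm)]`: take n items, none if too few
def takeMeta (n : Nat) (d : List Int) : Option (List Int × List Int) :=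
  if n ≤ d.length then some (d.take n, d.drop n) else none

mutual
def parseT : Nat → List Int → Option (PTree × List Int)
  | 0, _ => none
  | _+1, [] => none
  | _+1, [_] => none
  | fuel+1, nc :: nm :: rest =>
      match parseF fuel nc.toNat rest with
      | none => none
      | some (ch, d1) =>
          match takeMeta nm.toNat d1 with
          | none => none
          | some (ms, d2) => some (.mk nc ch ms, d2)
  termination_by fuel _ => (fuel, 0)
def parseF : Nat → Nat → List Int → Option (PForest × List Int)
  | _, 0, d => some (.nil, d)
  | fuel, n+1, d =>
      match parseT fuel d with
      | none => none
      | some (c, d1) =>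
          match parseF fuel n d1 with
          | none => none
          | some (f, d2) => some (.cons c f, d2)
  termination_by fuel n _ => (fuel, n + 1)
end

mutual
def evalT : PTree → Int → Int
  | .mk nc ch ms, t =>
      if nc = 0 then ms.foldl (· + ·) t
      else
        let p := evalF ch t
        ms.foldl (fun acc idx =>
          if 0 ≤ idx ∧ idx < (p.2.length : Int) then acc + p.2.getD idx.toNat 0 else acc) p.1
-- returns (final accumulator, list of accumulator snapshots after each child)
def evalF : PForest → Int → Int × List Int
  | .nil, t0 => (t0, [])
  | .cons c f, t =>
      let t1 := evalT c t
      let p := evalF f t1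
      (p.1, t1 :: p.2)
end

def process_alt (d : List Int) (t : Int) : List Int × Int :=
  match parseT (d.length + 1) d with
  | some (tr, rest) => (rest, evalT tr t)
  | none => (d, t)

-- ===== PRECONDITION & SPEC =====
-- Pre_: d starts with a well-formed header-encoded tree (every header has enough
-- following elements for its children and metadata); elsewhere Python A raises
-- IndexError (pop from an empty list).  Validity of a recursive length-prefixed
-- encoding is itself recursive; the shape checker below is a flat stack scan over
-- counts and lengths only (no accumulator, no tree, no values) — it is not either
-- port's recursion.  A frame (c, m) means: c subtrees still expected, then m
-- metadata entries; fuel d.length + 1 bounds the number of frames ever processed.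
def wfS : Nat → List Int → List (Nat × Nat) → Bool
  | _, _, [] => true
  | 0, _, _ => false
  | fuel+1, d, (0, m) :: st => m ≤ d.length && wfS fuel (d.drop m) st
  | fuel+1, nc :: nm :: rest, (c+1, m) :: st =>
      wfS fuel rest ((nc.toNat, nm.toNat) :: (c, m) :: st)
  | _+1, _, (_+1, _) :: _ => false

def Pre_process (d : List Int) (t : Int) : Prop := wfS (d.length + 1) d [(1, 0)] = true
instance (d : List Int) (t : Int) : Decidable (Pre_process d t) := by unfold Pre_process; infer_instance

def pvWitness_process : List Int × Int := ([1, 1, 0, 2, 3, 4, 0], 0)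

def Spec_process (d : List Int) (t : Int) (out : List Int × Int) : Prop := out = process_alt d t
instance (d : List Int) (t : Int) (out : List Int × Int) : Decidable (Spec_process d t out) := by unfold Spec_process; infer_instance

-- ===== CLAIM (what is proved, stated in full; the proofs are below) =====
def Claim_equal_process : Prop := ∀ (d : List Int) (t : Int), Dom_process d t → Pre_process d t → Spec_process d t (process d t)

-- ===== LEMMAS AND PROOFS =====

theorem takeMeta_succ_nil (n : Nat) : takeMeta (n + 1) ([] : List Int) = none := by
  simp [takeMeta]

theorem takeMeta_succ_cons (n : Nat) (x : Int) (d : List Int) :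
    takeMeta (n + 1) (x :: d) = (takeMeta n d).map (fun p => (x :: p.1, p.2)) := by
  simp only [takeMeta, List.length_cons, Nat.add_le_add_iff_right]
  split <;> simp

theorem popLeaf_eq (n : Nat) : ∀ (d : List Int) (t : Int),
    popLeaf n d t = match takeMeta n d with
      | some (ms, r) => some (r, ms.foldl (· + ·) t)
      | none => none := by
  induction n with
  | zero => intro d t; simp [popLeaf, takeMeta]
  | succ n ih =>
      intro d t
      cases d with
      | nil => rw [takeMeta_succ_nil]; simp [popLeaf]
      | cons x d =>
          simp only [popLeaf, takeMeta_succ_cons, ih]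
          cases h : takeMeta n d with
          | none => simp
          | some p => simp [List.foldl_cons]

theorem metaLoop_eq (n : Nat) : ∀ (d : List Int) (t : Int) (ch : List Int),
    metaLoop n d t ch = match takeMeta n d with
      | some (ms, r) => some (r, ms.foldl (fun acc idx =>
          if 0 ≤ idx ∧ idx < (ch.length : Int) then acc + ch.getD idx.toNat 0 else acc) t)
      | none => none := by
  induction n with
  | zero => intro d t ch; simp [metaLoop, takeMeta]
  | succ n ih =>
      intro d t ch
      cases d with
      | nil => rw [takeMeta_succ_nil]; simp [metaLoop]
      | cons x d =>
          simp only [metaLoop, takeMeta_succ_cons, ih]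
          cases h : takeMeta n d with
          | none => simp
          | some p => simp [List.foldl_cons]

def PStmt (fuel : Nat) : Prop := ∀ (d : List Int) (t : Int),
    processA fuel d t = match parseT fuel d with
      | some (tr, r) => some (r, evalT tr t)
      | none => none

theorem childLoop_eq (fuel : Nat) (hP : PStmt fuel) (n : Nat) :
    ∀ (d : List Int) (t : Int) (ch : List Int),
    childLoop fuel n d t ch = match parseF fuel n d with
      | some (f, r) => some (r, (evalF f t).1, ch ++ (evalF f t).2)
      | none => none := by
  induction n with
  | zero => intro d t ch; simp [childLoop, parseF, evalF]
  | succ n ih =>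
      intro d t ch
      simp only [childLoop, parseF, hP d t]
      cases hpt : parseT fuel d with
      | none => simp
      | some p =>
          obtain ⟨tr, r⟩ := p
          simp only [ih]
          cases hpf : parseF fuel n r with
          | none => simp
          | some q =>
              obtain ⟨f, r2⟩ := q
              simp [evalF]

theorem processA_eq : ∀ (fuel : Nat), PStmt fuel := by
  intro fuel
  induction fuel with
  | zero => intro d t; simp [processA, parseT]
  | succ fuel ih =>
      intro d t
      match d with
      | [] => simp [processA, parseT]
      | [x] => simp [processA, parseT]
      | nc :: nm :: rest =>
          by_cases hnc : nc = 0
          · subst hnc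
            simp only [processA, parseT, Int.toNat_zero, parseF, popLeaf_eq]
            cases htm : takeMeta nm.toNat rest with
            | none => simp
            | some p =>
                obtain ⟨ms, d2⟩ := p
                simp [evalT]
          · simp only [processA, parseT, if_neg hnc, childLoop_eq fuel ih]
            cases hpf : parseF fuel nc.toNat rest with
            | none => simp
            | some q =>
                obtain ⟨f, r⟩ := q
                simp only [metaLoop_eq]
                cases htm : takeMeta nm.toNat r with
                | none => simp
                | some p =>
                    obtain ⟨ms, d2⟩ := p
                    simp [evalT, if_neg hnc]

-- ===== VERDICT (by name: the statement is the Claim_ definition above) =====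
theorem process_spec : Claim_equal_process := by
  intro d t _hdom _hpre
  unfold Spec_process process process_alt
  rw [processA_eq (d.length + 1) d t]
  cases parseT (d.length + 1) d with
  | none => rfl
  | some p => cases p; rfl
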